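-- pv_equiv track=rewrite | github.com/jeen0202/Algorithm-Solve | Programmers/2021/10/102701/10271.py | solution
-- ===== SOURCE A (Python) =====
-- def solution(rows,columns,queries):
--     # row, colums에 맞는 이차원 list 생성
--     arr= []
--     answer = []
--     for i in range(rows):
--         arr.append(list(range(columns*i+1,columns+(columns*i)+1)))
--     # 회전 시작
--     for item in queries:
--         temp =  arr[item[0]-1][item[1]-1]
--         min = temp
--         for j in range(item[0]-1,item[2]-1):
--             if min > arr[j+1][item[1]-1]:
--                 min = arr[j+1][item[1]-1]
--             arr[j][item[1]-1] = arr[j+1][item[1]-1]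
--
--         for j in range(item[1]-1,item[3]-1):
--             if min > arr[item[2]-1][j+1]:
--                 min = arr[item[2]-1][j+1]
--             arr[item[2]-1][j] = arr[item[2]-1][j+1]
--
--         for j in range(item[2]-1,item[0]-1,-1):
--             if min > arr[j-1][item[3]-1]:
--                 min = arr[j-1][item[3]-1]
--             arr[j][item[3]-1] = arr[j-1][item[3]-1]
--
--         for j in range(item[3]-1,item[1],-1):
--             if min >  arr[item[0]-1][j-1]:
--                 min =  arr[item[0]-1][j-1]
--             arr[item[0]-1][j] = arr[item[0]-1][j-1]
--         arr[item[0]-1][item[1]] = temp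
--
--         answer.append(min)
--     return answer
-- ===== SOURCE B (Python) =====
-- def solution(rows, columns, queries):
--     # Gather the rectangle border into one clockwise ring, take its min,
--     # rotate the ring by one, and scatter it back.
--     grid = [[columns * i + j for j in range(1, columns + 1)] for i in range(rows)]
--     answer = []
--     for q in queries:
--         r1, c1, r2, c2 = q[0] - 1, q[1] - 1, q[2] - 1, q[3] - 1
--         coords = ([(r1, j) for j in range(c1, c2 + 1)]
--                   + [(i, c2) for i in range(r1 + 1, r2 + 1)]
--                   + [(r2, j) for j in reversed(range(c1, c2))]
--                   + [(i, c1) for i in reversed(range(r1 + 1, r2))])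
--         ring = [grid[i][j] for (i, j) in coords]
--         answer.append(min(ring))
--         rotated = ring[-1:] + ring[:-1]
--         for (i, j), v in zip(coords, rotated):
--             grid[i][j] = v
--     return answer
-- ===== Notes on version B (the rewrite author's own statement) =====
-- stated objective: simpler
-- what changed: A rotates the rectangle border in place with four interleaved shift loops that track the minimum as a running variable; B gathers the border into one explicit clockwise ring list, takes min(ring), rotates the list by one and scatters it back.
-- outside the precondition, e.g. on solution(2, 2, [[2, 1, 1, 2]]): A returns [2], B returns [1]
import Mathlib
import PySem

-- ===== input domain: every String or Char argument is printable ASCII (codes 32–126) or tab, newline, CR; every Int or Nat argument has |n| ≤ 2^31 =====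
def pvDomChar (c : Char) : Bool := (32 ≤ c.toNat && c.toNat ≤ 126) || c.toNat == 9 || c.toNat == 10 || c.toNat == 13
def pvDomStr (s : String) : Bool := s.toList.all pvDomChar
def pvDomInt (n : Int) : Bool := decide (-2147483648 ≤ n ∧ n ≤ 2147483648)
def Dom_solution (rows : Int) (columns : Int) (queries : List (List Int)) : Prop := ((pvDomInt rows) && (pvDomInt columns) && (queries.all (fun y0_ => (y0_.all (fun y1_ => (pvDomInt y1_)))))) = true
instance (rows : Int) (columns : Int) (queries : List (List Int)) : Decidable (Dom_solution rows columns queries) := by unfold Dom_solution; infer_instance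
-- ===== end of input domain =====

-- B replaces A's four interleaved in-place border-shift loops by a gather/min/rotate/scatter
-- over one explicit clockwise ring list (objective: simpler decomposition, same cost).

-- Shared 2-D subscript helpers (Python's arr[i][j] read and arr[i][j] = v write):
-- exact for the nonnegative in-range indices that Pre_solution guarantees.
def getRow (g : List (List Int)) (i : Int) : List Int :=
  if 0 ≤ i then g.getD i.toNat [] else []
def get2 (g : List (List Int)) (i j : Int) : Int :=
  if 0 ≤ j then (getRow g i).getD j.toNat 0 else 0
def set2 (g : List (List Int)) (i j v : Int) : List (List Int) :=
  if 0 ≤ i ∧ 0 ≤ j then g.set i.toNat ((getRow g i).set j.toNat v) else g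

-- ===== PORT A =====
-- per-query body of A ('for item in queries: …'), state = (arr, answer)
def solutionStep (st : List (List Int) × List Int) (item : List Int) : List (List Int) × List Int :=
  let i0 := PySem.List.pyGetD item 0 0
  let i1 := PySem.List.pyGetD item 1 0
  let i2 := PySem.List.pyGetD item 2 0
  let i3 := PySem.List.pyGetD item 3 0
  let temp := get2 st.1 (i0 - 1) (i1 - 1)
  let p1 := (PySem.List.pyRange (i0 - 1) (i2 - 1) 1).foldl (fun p j =>
      let v := get2 p.1 (j + 1) (i1 - 1)
      (set2 p.1 j (i1 - 1) v, if p.2 > v then v else p.2)) (st.1, temp)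
  let p2 := (PySem.List.pyRange (i1 - 1) (i3 - 1) 1).foldl (fun p j =>
      let v := get2 p.1 (i2 - 1) (j + 1)
      (set2 p.1 (i2 - 1) j v, if p.2 > v then v else p.2)) p1
  let p3 := (PySem.List.pyRange (i2 - 1) (i0 - 1) (-1)).foldl (fun p j =>
      let v := get2 p.1 (j - 1) (i3 - 1)
      (set2 p.1 j (i3 - 1) v, if p.2 > v then v else p.2)) p2
  let p4 := (PySem.List.pyRange (i3 - 1) i1 (-1)).foldl (fun p j =>
      let v := get2 p.1 (i0 - 1) (j - 1)
      (set2 p.1 (i0 - 1) j v, if p.2 > v then v else p.2)) p3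
  (set2 p4.1 (i0 - 1) i1 temp, st.2 ++ [p4.2])

def solution (rows : Int) (columns : Int) (queries : List (List Int)) : List Int :=
  let arr0 := (PySem.List.pyRange 0 rows 1).foldl
    (fun arr i => arr ++ [PySem.List.pyRange (columns * i + 1) (columns + columns * i + 1) 1]) []
  (queries.foldl solutionStep (arr0, [])).2

-- ===== PORT B =====
-- per-query body of B: gather the clockwise ring, take min, rotate by one, scatter back
def solutionAltStep (st : List (List Int) × List Int) (q : List Int) : List (List Int) × List Int :=
  let r1 := PySem.List.pyGetD q 0 0 - 1
  let c1 := PySem.List.pyGetD q 1 0 - 1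
  let r2 := PySem.List.pyGetD q 2 0 - 1
  let c2 := PySem.List.pyGetD q 3 0 - 1
  let coords : List (Int × Int) :=
    (PySem.List.pyRange c1 (c2 + 1) 1).map (fun j => (r1, j))
    ++ (PySem.List.pyRange (r1 + 1) (r2 + 1) 1).map (fun i => (i, c2))
    ++ ((PySem.List.pyRange c1 c2 1).reverse.map (fun j => (r2, j)))
    ++ ((PySem.List.pyRange (r1 + 1) r2 1).reverse.map (fun i => (i, c1)))
  let ring := coords.map (fun p => get2 st.1 p.1 p.2)
  -- min(ring): ring is nonempty under Pre_solution
  let m := (PySem.List.min? ring (fun x => x)).getD 0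
  let rotated := PySem.List.slice ring (some (-1)) none ++ PySem.List.slice ring none (some (-1))
  let grid' := (coords.zip rotated).foldl (fun g pv => set2 g pv.1.1 pv.1.2 pv.2) st.1
  (grid', st.2 ++ [m])

def solution_alt (rows : Int) (columns : Int) (queries : List (List Int)) : List Int :=
  let grid0 := (PySem.List.pyRange 0 rows 1).map
    (fun i => (PySem.List.pyRange 1 (columns + 1) 1).map (fun j => columns * i + j))
  (queries.foldl solutionAltStep (grid0, [])).2

-- ===== PRECONDITION & SPEC =====
-- Pre_solution restricts to the problem's natural domain: every query names a genuine
-- rectangle 1 ≤ r1 < r2 ≤ rows, 1 ≤ c1 < c2 ≤ columns. Outside it A raises IndexError,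
-- or (on reversed/flat rectangles) returns values produced by its shift loops running
-- over a degenerate border — accidental corner behaviour outside the stated problem domain.
def Pre_solution (rows : Int) (columns : Int) (queries : List (List Int)) : Prop :=
  ∀ q ∈ queries, 4 ≤ q.length ∧
    1 ≤ q.getD 0 0 ∧ q.getD 0 0 < q.getD 2 0 ∧ q.getD 2 0 ≤ rows ∧
    1 ≤ q.getD 1 0 ∧ q.getD 1 0 < q.getD 3 0 ∧ q.getD 3 0 ≤ columns
instance (rows : Int) (columns : Int) (queries : List (List Int)) : Decidable (Pre_solution rows columns queries) := by
  unfold Pre_solution; infer_instance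
def pvWitness_solution : Int × Int × List (List Int) := (3, 3, [[1, 1, 2, 3], [1, 2, 3, 3]])

def Spec_solution (rows : Int) (columns : Int) (queries : List (List Int)) (out : List Int) : Prop := out = solution_alt rows columns queries
instance (rows : Int) (columns : Int) (queries : List (List Int)) (out : List Int) : Decidable (Spec_solution rows columns queries out) := by unfold Spec_solution; infer_instance

-- ===== CLAIM (what is proved, stated in full; the proofs are below) =====
def Claim_equal_solution : Prop := ∀ (rows : Int) (columns : Int) (queries : List (List Int)), Dom_solution rows columns queries → Pre_solution rows columns queries → Spec_solution rows columns queries (solution rows columns queries)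

-- ===== LEMMAS AND PROOFS =====

lemma length_set2 (g : List (List Int)) (x y v : Int) : (set2 g x y v).length = g.length := by
  unfold set2; split_ifs <;> simp

lemma getElem?_set2 (g : List (List Int)) (x y v : Int) (n : Nat) :
    (set2 g x y v)[n]? =
      if 0 ≤ x ∧ 0 ≤ y ∧ n = x.toNat ∧ n < g.length then some ((getRow g x).set y.toNat v)
      else g[n]? := by
  unfold set2
  split_ifs with h1 h2 h3
  · rw [h2.2.2.1, List.getElem?_set_self (by omega)]
  · by_cases hn : n = x.toNat
    · rw [hn, List.set_eq_of_length_le (by omega)]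
    · rw [List.getElem?_set_ne (by omega)]
  · exact absurd ⟨h3.1, h3.2.1⟩ h1
  · rfl

lemma getRow_eq (g : List (List Int)) (i : Int) :
    getRow g i = (if 0 ≤ i then g[i.toNat]? else none).getD [] := by
  unfold getRow; split_ifs <;> simp [List.getD_eq_getElem?_getD]

lemma getRow_set2_ne (g : List (List Int)) (x y v i : Int) (h : i ≠ x) :
    getRow (set2 g x y v) i = getRow g i := by
  rw [getRow_eq g, getRow_eq (set2 g x y v), getElem?_set2]
  split_ifs with h1 h2 <;> first | rfl | omega

lemma getRow_set2_self (g : List (List Int)) (x y v : Int) (hx : 0 ≤ x) (hy : 0 ≤ y)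
    (hlen : x.toNat < g.length) :
    getRow (set2 g x y v) x = (getRow g x).set y.toNat v := by
  conv_lhs => rw [getRow_eq, getElem?_set2]
  rw [if_pos (show 0 ≤ x ∧ 0 ≤ y ∧ x.toNat = x.toNat ∧ x.toNat < g.length from ⟨hx, hy, rfl, hlen⟩),
    if_pos hx]
  rfl

lemma getRow_set2_big (g : List (List Int)) (x y v i : Int) (hlen : g.length ≤ x.toNat) :
    getRow (set2 g x y v) i = getRow g i := by
  rw [getRow_eq g, getRow_eq (set2 g x y v)]
  split_ifs with hi
  · rw [getElem?_set2, if_neg (by intro hh; omega)]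
  · rfl

lemma set2_noop (g : List (List Int)) (x y v : Int) (h : ¬ (0 ≤ x ∧ 0 ≤ y)) : set2 g x y v = g := by
  unfold set2; rw [if_neg h]

lemma get2_set2_ne (g : List (List Int)) (x y v i j : Int) (h : ¬ (i = x ∧ j = y)) :
    get2 (set2 g x y v) i j = get2 g i j := by
  rw [not_and] at h
  by_cases hix : i = x
  · subst hix
    have hj : j ≠ y := h rfl
    by_cases hlen : i.toNat < g.length
    · by_cases hx : 0 ≤ i
      · by_cases hy : 0 ≤ y
        · unfold get2
          rw [getRow_set2_self g i y v hx hy hlen]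
          split_ifs with hj0
          · rw [List.getD_eq_getElem?_getD, List.getD_eq_getElem?_getD,
              List.getElem?_set_ne (by omega)]
          · rfl
        · rw [set2_noop] <;> tauto
      · rw [set2_noop]; tauto
    · rw [get2, get2, getRow_set2_big g i y v i (by omega)]
  · rw [get2, get2, getRow_set2_ne g x y v i hix]

lemma set2_comm (g : List (List Int)) (x₁ y₁ v₁ x₂ y₂ v₂ : Int) (h : ¬ (x₁ = x₂ ∧ y₁ = y₂)) :
    set2 (set2 g x₁ y₁ v₁) x₂ y₂ v₂ = set2 (set2 g x₂ y₂ v₂) x₁ y₁ v₁ := by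
  rw [not_and] at h
  by_cases h1 : 0 ≤ x₁ ∧ 0 ≤ y₁
  case neg => rw [set2_noop g x₁ y₁ v₁ h1, set2_noop _ x₁ y₁ v₁ h1]
  by_cases h2 : 0 ≤ x₂ ∧ 0 ≤ y₂
  case neg => rw [set2_noop g x₂ y₂ v₂ h2, set2_noop _ x₂ y₂ v₂ h2]
  apply List.ext_getElem?
  intro n
  rw [getElem?_set2, getElem?_set2, getElem?_set2, getElem?_set2, length_set2, length_set2]
  by_cases hx : x₁ = x₂
  · subst hx
    have hy : y₁ ≠ y₂ := h rfl
    by_cases hn : n = x₁.toNat ∧ n < g.length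
    · rw [if_pos ⟨h2.1, h2.2, hn.1, hn.2⟩, if_pos ⟨h1.1, h1.2, hn.1, hn.2⟩,
        getRow_set2_self g x₁ y₁ v₁ h1.1 h1.2 (by omega),
        getRow_set2_self g x₁ y₂ v₂ h2.1 h2.2 (by omega),
        List.set_comm _ _ (show y₁.toNat ≠ y₂.toNat by omega)]
    · rw [if_neg (by tauto), if_neg (by tauto), if_neg (by tauto), if_neg (by tauto)]
  · rw [getRow_set2_ne g x₂ y₂ v₂ x₁ (by omega), getRow_set2_ne g x₁ y₁ v₁ x₂ (by omega)]
    by_cases hn1 : n = x₁.toNat ∧ n < g.length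
    · have hne2 : ¬(0 ≤ x₂ ∧ 0 ≤ y₂ ∧ n = x₂.toNat ∧ n < g.length) := by intro hh; omega
      rw [if_neg hne2, if_pos ⟨h1.1, h1.2, hn1.1, hn1.2⟩, if_pos ⟨h1.1, h1.2, hn1.1, hn1.2⟩]
    · by_cases hn2 : n = x₂.toNat ∧ n < g.length
      · rw [if_pos ⟨h2.1, h2.2, hn2.1, hn2.2⟩, if_neg (by tauto), if_pos ⟨h2.1, h2.2, hn2.1, hn2.2⟩]
      · rw [if_neg (by tauto), if_neg (by tauto), if_neg (by tauto), if_neg (by tauto)]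

def applyW (g : List (List Int)) (W : List ((Int × Int) × Int)) : List (List Int) :=
  W.foldl (fun g pv => set2 g pv.1.1 pv.1.2 pv.2) g

lemma applyW_cons (g : List (List Int)) (e : (Int × Int) × Int) (W : List ((Int × Int) × Int)) :
    applyW g (e :: W) = applyW (set2 g e.1.1 e.1.2 e.2) W := rfl

lemma applyW_append (g : List (List Int)) (W₁ W₂ : List ((Int × Int) × Int)) :
    applyW g (W₁ ++ W₂) = applyW (applyW g W₁) W₂ := List.foldl_append ..

lemma get2_applyW_ne (g : List (List Int)) (W : List ((Int × Int) × Int)) (i j : Int)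
    (h : ∀ e ∈ W, e.1 ≠ (i, j)) : get2 (applyW g W) i j = get2 g i j := by
  induction W generalizing g with
  | nil => rfl
  | cons e W ih =>
    rw [applyW_cons, ih _ (fun e' he' => h e' (List.mem_cons_of_mem e he')),
      get2_set2_ne _ _ _ _ _ _ (by
        have hne := h e List.mem_cons_self
        rintro ⟨hi, hj⟩
        exact hne (Prod.ext_iff.mpr ⟨hi.symm, hj.symm⟩))]

lemma applyW_perm (g : List (List Int)) (W₁ W₂ : List ((Int × Int) × Int))
    (h : W₁.Perm W₂) (hnd : (W₁.map Prod.fst).Nodup) : applyW g W₁ = applyW g W₂ := by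
  induction h generalizing g with
  | nil => rfl
  | cons e _ ih =>
    simp only [List.map_cons, List.nodup_cons] at hnd
    rw [applyW_cons, applyW_cons, ih _ hnd.2]
  | swap e₁ e₂ l =>
    simp only [List.map_cons, List.nodup_cons, List.mem_cons] at hnd
    rw [applyW_cons, applyW_cons, applyW_cons, applyW_cons,
      set2_comm _ _ _ _ _ _ _ (by
        rintro ⟨hi, hj⟩
        exact hnd.1 (Or.inl (Prod.ext_iff.mpr ⟨hi, hj⟩)))]
  | trans h₁ _ ih₁ ih₂ =>
    rw [ih₁ _ hnd, ih₂ _ (by rw [← (h₁.map Prod.fst).nodup_iff]; exact hnd)]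

lemma loopG (L : List Int) (wi wj ri rj : Int → Int) (mc : Int → Int → Int)
    (g : List (List Int)) (m : Int)
    (hp : L.Pairwise (fun x y => ¬ (ri y = wi x ∧ rj y = wj x))) :
    L.foldl (fun p j =>
        let v := get2 p.1 (ri j) (rj j)
        (set2 p.1 (wi j) (wj j) v, mc p.2 v)) (g, m)
    = (applyW g (L.map (fun j => ((wi j, wj j), get2 g (ri j) (rj j)))),
       L.foldl (fun m' j => mc m' (get2 g (ri j) (rj j))) m) := by
  induction L generalizing g m with
  | nil => rfl
  | cons k L ih =>
    simp only [List.pairwise_cons] at hp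
    simp only [List.foldl_cons, List.map_cons]
    rw [ih _ _ hp.2, applyW_cons]
    have hrw : ∀ j ∈ L, get2 (set2 g (wi k) (wj k) (get2 g (ri k) (rj k))) (ri j) (rj j)
        = get2 g (ri j) (rj j) := by
      intro j hj
      exact get2_set2_ne _ _ _ _ _ _ (hp.1 j hj)
    refine Prod.ext ?_ ?_
    · show applyW _ _ = applyW _ _
      congr 1
      exact List.map_eq_map_iff.mpr (fun j hj => by rw [hrw j hj])
    · show List.foldl _ _ L = List.foldl _ _ L
      exact List.foldl_ext _ _ _ (fun acc j hj => by rw [hrw j hj])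

lemma ite_min (m v : Int) : (if m > v then v else m) = min m v := by
  rw [min_def]; split_ifs <;> omega

lemma foldl_min_mem (l : List Int) (m : Int) : l.foldl min m ∈ m :: l := by
  induction l generalizing m with
  | nil => simp
  | cons x l ih =>
    rw [List.foldl_cons]
    rcases min_choice m x with h | h <;> rw [h] <;>
      [rcases List.mem_cons.mp (ih m) with h' | h'; rcases List.mem_cons.mp (ih x) with h' | h'] <;>
      simp [h', List.mem_cons]

lemma foldl_min_le (l : List Int) (m : Int) : ∀ x ∈ m :: l, l.foldl min m ≤ x := by
  induction l generalizing m with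
  | nil => simp
  | cons y l ih =>
    intro x hx
    rw [List.foldl_cons]
    have hmy : l.foldl min (min m y) ≤ min m y := ih (min m y) _ List.mem_cons_self
    rcases List.mem_cons.mp hx with h | hx
    · rw [h]; exact le_trans hmy (min_le_left ..)
    · rcases List.mem_cons.mp hx with h | hx
      · rw [h]; exact le_trans hmy (min_le_right ..)
      · exact ih (min m y) x (List.mem_cons_of_mem _ hx)

lemma minval_eq (ring l : List Int) (m : Int) (hperm : ring.Perm (m :: l)) :
    (PySem.List.min? ring (fun x => x)).getD 0 = l.foldl min m := by
  obtain ⟨v, hv⟩ : ∃ v, PySem.List.min? ring (fun x => x) = some v := by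
    rcases hmm : PySem.List.min? ring (fun x => x) with _ | v
    · rw [PySem.List.min?_eq_none_iff] at hmm
      subst hmm
      exact absurd hperm.symm (by simp)
    · exact ⟨v, rfl⟩
  rw [hv, Option.getD_some]
  have hvmem : v ∈ ring := PySem.List.min?_mem hv
  have hvmin : ∀ y ∈ ring, v ≤ y := PySem.List.min?_isMin hv
  have hfm : l.foldl min m ∈ ring := hperm.symm.subset (foldl_min_mem l m)
  have hfl : ∀ x ∈ ring, l.foldl min m ≤ x := fun x hx =>
    foldl_min_le l m x (hperm.subset hx)
  exact le_antisymm (hvmin _ hfm) (hfl v hvmem)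

lemma map_pyRange_add {α : Type} (t a b : Int) (f : Int → α) :
    (PySem.List.pyRange (a + t) (b + t) 1).map f = (PySem.List.pyRange a b 1).map (fun j => f (j + t)) := by
  rw [PySem.List.pyRange_one, PySem.List.pyRange_one, List.map_map, List.map_map,
    show b + t - (a + t) = b - a by ring]
  exact List.map_congr_left (fun k _ => by show f _ = f _; congr 1; ring)

lemma map_sub_pyRange (t a b : Int) :
    (PySem.List.pyRange a b 1).map (fun j => t - j) = PySem.List.pyRange (t - a) (t - b) (-1) := by
  rw [PySem.List.pyRange_one, PySem.List.pyRange_neg_one, List.map_map,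
    show t - a - (t - b) = b - a by ring]
  exact List.map_congr_left (fun k _ => by show t - _ = _; ring)

lemma map_pyRange_sub {α : Type} (f : Int → α) (t a b : Int) :
    (PySem.List.pyRange a b 1).map (fun j => f (t - j))
      = ((PySem.List.pyRange (t - b + 1) (t - a + 1) 1).map f).reverse := by
  have h1 : (PySem.List.pyRange a b 1).map (fun j => f (t - j))
      = ((PySem.List.pyRange a b 1).map (fun j => t - j)).map f := by
    rw [List.map_map]; rfl
  rw [h1, map_sub_pyRange, PySem.List.pyRange_neg_one_eq_reverse, List.map_reverse]

lemma reverse_map_pyRange {α : Type} (f : Int → α) (a b : Int) :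
    ((PySem.List.pyRange a b 1).map f).reverse
      = (PySem.List.pyRange 0 (b - a) 1).map (fun j => f (b - 1 - j)) := by
  have := (map_pyRange_sub f (b - 1) 0 (b - a)).symm
  rw [show b - 1 - (b - a) + 1 = a by ring, show b - 1 - 0 + 1 = b by ring] at this
  exact this

-- F l p = l.zip (p :: l.dropLast): pairs each ring cell with its predecessor
def F {α : Type} (l : List α) (p : α) : List (α × α) := l.zip (p :: l.dropLast)

lemma F_cons {α : Type} (x : α) (xs : List α) (p : α) : F (x :: xs) p = (x, p) :: F xs x := by
  cases xs <;> simp [F, List.dropLast]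

lemma F_append {α : Type} (u v : List α) (p : α) (hu : u ≠ []) :
    F (u ++ v) p = F u p ++ F v (u.getLast hu) := by
  induction u generalizing p with
  | nil => exact absurd rfl hu
  | cons x u ih =>
    rcases eq_or_ne u [] with rfl | hne
    · simp only [List.singleton_append, F_cons]
      rfl
    · rw [List.cons_append, F_cons, ih x hne, F_cons, List.getLast_cons hne, List.cons_append]

lemma F_map_pyRange {α : Type} (a b : Int) (hab : a < b) (f : Int → α) (p : α) :
    F ((PySem.List.pyRange a b 1).map f) p
      = (f a, p) :: (PySem.List.pyRange (a + 1) b 1).map (fun j => (f j, f (j - 1))) := by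
  have hn : ((b - a).toNat - 1) + 1 = (b - a).toNat := by omega
  induction hk : (b - a).toNat generalizing a p with
  | zero => omega
  | succ n ih =>
    rw [PySem.List.pyRange_one_cons hab, List.map_cons, F_cons]
    rcases eq_or_lt_of_le (by omega : a + 1 ≤ b) with hb | hb
    · rw [PySem.List.pyRange_one_eq_nil (le_of_eq hb.symm)]
      rfl
    · rw [ih (a + 1) hb (f a) (by omega) (by omega), PySem.List.pyRange_one_cons hb, List.map_cons,
        show a + 1 - 1 = a by ring]

-- ring-edge families: (cell, clockwise predecessor) for each border cell
def eTop (a b d : Int) : List ((Int × Int) × (Int × Int)) :=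
  (PySem.List.pyRange (b + 1) (d + 1) 1).map (fun k => ((a, k), (a, k - 1)))
def eRight (a c d : Int) : List ((Int × Int) × (Int × Int)) :=
  (PySem.List.pyRange (a + 1) (c + 1) 1).map (fun i => ((i, d), (i - 1, d)))
def eBot (b c d : Int) : List ((Int × Int) × (Int × Int)) :=
  (PySem.List.pyRange b d 1).map (fun k => ((c, k), (c, k + 1)))
def eLeft (a b c : Int) : List ((Int × Int) × (Int × Int)) :=
  (PySem.List.pyRange a c 1).map (fun i => ((i, b), (i + 1, b)))
def canon (a b c d : Int) : List ((Int × Int) × (Int × Int)) :=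
  eTop a b d ++ eRight a c d ++ eBot b c d ++ eLeft a b c

-- the clockwise border walk of B
def coordsOf (a b c d : Int) : List (Int × Int) :=
  (PySem.List.pyRange b (d + 1) 1).map (fun j => (a, j))
  ++ (PySem.List.pyRange (a + 1) (c + 1) 1).map (fun i => (i, d))
  ++ ((PySem.List.pyRange b d 1).reverse.map (fun j => (c, j)))
  ++ ((PySem.List.pyRange (a + 1) c 1).reverse.map (fun i => (i, b)))

lemma C3_eq (b c d : Int) :
    ((PySem.List.pyRange b d 1).reverse.map (fun j => ((c : Int), j)))
      = (PySem.List.pyRange 0 (d - b) 1).map (fun j => (c, d - 1 - j)) := by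
  rw [List.map_reverse, reverse_map_pyRange]

lemma C4_eq (a b c : Int) :
    ((PySem.List.pyRange (a + 1) c 1).reverse.map (fun i => (i, (b : Int))))
      = (PySem.List.pyRange 0 (c - a - 1) 1).map (fun j => (c - 1 - j, b)) := by
  rw [List.map_reverse, reverse_map_pyRange, show c - (a + 1) = c - a - 1 by ring]

lemma pyRange_map_ne_nil {α : Type} (a b : Int) (hab : a < b) (f : Int → α) :
    (PySem.List.pyRange a b 1).map f ≠ [] := by
  have hlen : ((PySem.List.pyRange a b 1).map f).length = (b - a).toNat := by
    rw [List.length_map, PySem.List.length_pyRange_one]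
  intro hc
  rw [hc] at hlen
  simp at hlen
  omega

lemma getLast?_map_pyRange {α : Type} (a b : Int) (hab : a < b) (f : Int → α) :
    ((PySem.List.pyRange a b 1).map f).getLast? = some (f (b - 1)) := by
  have hsplit : PySem.List.pyRange a b 1 = PySem.List.pyRange a (b - 1) 1 ++ [b - 1] := by
    have hx := PySem.List.pyRange_one_succ_right (a := a) (b := b - 1) (by omega)
    rw [show b - 1 + 1 = b by ring] at hx
    exact hx
  rw [hsplit, List.map_append]
  exact List.getLast?_concat ..

lemma coordsOf_ne_nil (a b c d : Int) (hb : b < d) : coordsOf a b c d ≠ [] := by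
  unfold coordsOf
  intro hc
  rcases List.append_eq_nil_iff.mp hc with ⟨hc1, -⟩
  rcases List.append_eq_nil_iff.mp hc1 with ⟨hc2, -⟩
  rcases List.append_eq_nil_iff.mp hc2 with ⟨hc3, -⟩
  exact pyRange_map_ne_nil b (d + 1) (by omega) _ hc3

lemma coordsOf_getLast? (a b c d : Int) (ha : a < c) (hb : b < d) :
    (coordsOf a b c d).getLast? = some (a + 1, b) := by
  unfold coordsOf
  rcases eq_or_lt_of_le (by omega : a + 1 ≤ c) with hc | hc
  · have h4 : (PySem.List.pyRange (a + 1) c 1).reverse.map (fun i => (i, (b : Int))) = [] := by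
      rw [PySem.List.pyRange_one_eq_nil (le_of_eq hc.symm)]
      rfl
    rw [h4, List.append_nil, List.getLast?_append_of_ne_nil _ (by
        rw [C3_eq]; exact pyRange_map_ne_nil 0 (d - b) (by omega) _),
      C3_eq, getLast?_map_pyRange 0 (d - b) (by omega)]
    simp only [Option.some.injEq, Prod.mk.injEq]
    norm_num
    omega
  · rw [List.getLast?_append_of_ne_nil _ (by
        rw [C4_eq]; exact pyRange_map_ne_nil 0 (c - a - 1) (by omega) _),
      C4_eq, getLast?_map_pyRange 0 (c - a - 1) (by omega)]
    simp only [Option.some.injEq, Prod.mk.injEq]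
    norm_num
    omega

lemma coordsOf_getLast (a b c d : Int) (ha : a < c) (hb : b < d) (h) :
    (coordsOf a b c d).getLast h = (a + 1, b) :=
  List.getLast_of_mem_getLast? (coordsOf_getLast? a b c d ha hb)

lemma FC1_eq (a b d : Int) (hb : b < d) (p : Int × Int) :
    F ((PySem.List.pyRange b (d + 1) 1).map (fun j => ((a : Int), j))) p
      = (((a, b) : Int × Int), p) :: eTop a b d := by
  rw [F_map_pyRange b (d + 1) (by omega)]
  rfl

lemma FC2_eq (a c d : Int) (ha : a < c) :
    F ((PySem.List.pyRange (a + 1) (c + 1) 1).map (fun i => (i, (d : Int)))) (a, d)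
      = eRight a c d := by
  rw [F_map_pyRange (a + 1) (c + 1) (by omega), eRight,
    PySem.List.pyRange_one_cons (show a + 1 < c + 1 by omega)]
  rw [List.map_cons, show a + 1 - 1 = a by ring]

lemma FC3_perm (b c d : Int) (hb : b < d) :
    (F ((PySem.List.pyRange b d 1).reverse.map (fun j => ((c : Int), j))) (c, d)).Perm
      (eBot b c d) := by
  rw [C3_eq, F_map_pyRange 0 (d - b) (by omega)]
  have htail : (PySem.List.pyRange (0 + 1) (d - b) 1).map
        (fun j => ((((c : Int), d - 1 - j) : Int × Int), ((c : Int), d - 1 - (j - 1))))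
      = ((PySem.List.pyRange b (d - 1) 1).map
          (fun k => ((((c : Int), k) : Int × Int), ((c : Int), k + 1)))).reverse := by
    have hx := map_pyRange_sub
      (fun k => ((((c : Int), k) : Int × Int), ((c : Int), k + 1))) (d - 1) 1 (d - b)
    rw [show d - 1 - (d - b) + 1 = b by ring, show d - 1 - 1 + 1 = d - 1 by ring] at hx
    rw [show (0 : Int) + 1 = 1 by ring, ← hx]
    exact List.map_congr_left (fun j _ => by simp only [Prod.mk.injEq, true_and, and_true]; omega)
  rw [htail, show d - 1 - 0 = d - 1 by ring]
  have hsplit : eBot b c d = ((PySem.List.pyRange b (d - 1) 1).map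
      (fun k => ((((c : Int), k) : Int × Int), ((c : Int), k + 1))))
      ++ [((((c : Int), d - 1) : Int × Int), ((c : Int), d))] := by
    rw [eBot]
    have hx := PySem.List.pyRange_one_succ_right (a := b) (b := d - 1) (by omega)
    rw [show d - 1 + 1 = d by ring] at hx
    rw [hx, List.map_append]
    rw [List.map_singleton, show d - 1 + 1 = d by ring]
  rw [hsplit]
  exact ((List.reverse_perm _).cons _).trans (List.perm_append_singleton _ _).symm

lemma FC4_perm (a b c : Int) (hc : a + 1 < c) :
    (F ((PySem.List.pyRange (a + 1) c 1).reverse.map (fun i => (i, (b : Int)))) (c, b)).Perm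
      ((PySem.List.pyRange (a + 1) c 1).map (fun i => (((i, b) : Int × Int), (i + 1, b)))) := by
  rw [C4_eq, F_map_pyRange 0 (c - a - 1) (by omega)]
  have htail : (PySem.List.pyRange (0 + 1) (c - a - 1) 1).map
        (fun j => (((c - 1 - j, (b : Int)) : Int × Int), (c - 1 - (j - 1), (b : Int))))
      = ((PySem.List.pyRange (a + 1) (c - 1) 1).map
          (fun i => (((i, (b : Int)) : Int × Int), (i + 1, (b : Int))))).reverse := by
    have hx := map_pyRange_sub
      (fun i => (((i, (b : Int)) : Int × Int), (i + 1, (b : Int)))) (c - 1) 1 (c - a - 1)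
    rw [show c - 1 - (c - a - 1) + 1 = a + 1 by ring, show c - 1 - 1 + 1 = c - 1 by ring] at hx
    rw [show (0 : Int) + 1 = 1 by ring, ← hx]
    exact List.map_congr_left (fun j _ => by simp only [Prod.mk.injEq, true_and, and_true]; omega)
  rw [htail, show c - 1 - 0 = c - 1 by ring]
  have hsplit : (PySem.List.pyRange (a + 1) c 1).map (fun i => (((i, b) : Int × Int), (i + 1, b)))
      = ((PySem.List.pyRange (a + 1) (c - 1) 1).map
          (fun i => (((i, (b : Int)) : Int × Int), (i + 1, (b : Int)))))
      ++ [(((c - 1, b) : Int × Int), (c, b))] := by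
    have hx := PySem.List.pyRange_one_succ_right (a := a + 1) (b := c - 1) (by omega)
    rw [show c - 1 + 1 = c by ring] at hx
    rw [hx, List.map_append, List.map_singleton, show c - 1 + 1 = c by ring]
  rw [hsplit]
  exact ((List.reverse_perm _).cons _).trans (List.perm_append_singleton _ _).symm

lemma getLast_C1 (a b d : Int) (hb : b < d) (h) :
    (((PySem.List.pyRange b (d + 1) 1).map (fun j => ((a : Int), j))).getLast h) = (a, d) := by
  have hx := getLast?_map_pyRange b (d + 1) (by omega) (fun j => ((a : Int), j))
  rw [show d + 1 - 1 = d by ring] at hx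
  exact List.getLast_of_mem_getLast? hx

lemma getLast_C2 (a c d : Int) (ha : a < c) (h) :
    (((PySem.List.pyRange (a + 1) (c + 1) 1).map (fun i => (i, (d : Int)))).getLast h) = (c, d) := by
  have hx := getLast?_map_pyRange (a + 1) (c + 1) (by omega) (fun i => (i, (d : Int)))
  rw [show c + 1 - 1 = c by ring] at hx
  exact List.getLast_of_mem_getLast? hx

lemma getLast_C3 (b c d : Int) (hb : b < d) (h) :
    (((PySem.List.pyRange b d 1).reverse.map (fun j => ((c : Int), j))).getLast h) = (c, b) := by
  have hx := getLast?_map_pyRange 0 (d - b) (by omega) (fun j => ((c : Int), d - 1 - j))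
  rw [show d - 1 - (d - b - 1) = b by ring] at hx
  refine List.getLast_of_mem_getLast? ?_
  rw [C3_eq]
  exact hx

lemma edgesB_perm (a b c d : Int) (ha : a < c) (hb : b < d) :
    (F (coordsOf a b c d) (a + 1, b)).Perm (canon a b c d) := by
  have hC1ne : ((PySem.List.pyRange b (d + 1) 1).map (fun j => ((a : Int), j))) ≠ [] :=
    pyRange_map_ne_nil b (d + 1) (by omega) _
  have hC2ne : ((PySem.List.pyRange (a + 1) (c + 1) 1).map (fun i => (i, (d : Int)))) ≠ [] :=
    pyRange_map_ne_nil (a + 1) (c + 1) (by omega) _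
  have hC3ne : ((PySem.List.pyRange b d 1).reverse.map (fun j => ((c : Int), j))) ≠ [] := by
    rw [C3_eq]
    exact pyRange_map_ne_nil 0 (d - b) (by omega) _
  have h12ne : ((PySem.List.pyRange b (d + 1) 1).map (fun j => ((a : Int), j))
      ++ (PySem.List.pyRange (a + 1) (c + 1) 1).map (fun i => (i, (d : Int)))) ≠ [] := by
    intro hcon
    exact hC1ne (List.append_eq_nil_iff.mp hcon).1
  have h123ne : (((PySem.List.pyRange b (d + 1) 1).map (fun j => ((a : Int), j))
      ++ (PySem.List.pyRange (a + 1) (c + 1) 1).map (fun i => (i, (d : Int))))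
      ++ ((PySem.List.pyRange b d 1).reverse.map (fun j => ((c : Int), j)))) ≠ [] := by
    intro hcon
    exact h12ne (List.append_eq_nil_iff.mp hcon).1
  have hhead : eLeft a b c = (((a, b) : Int × Int), ((a + 1 : Int), (b : Int)))
      :: (PySem.List.pyRange (a + 1) c 1).map (fun i => (((i, b) : Int × Int), (i + 1, b))) := by
    rw [eLeft, PySem.List.pyRange_one_cons ha, List.map_cons]
  rcases eq_or_lt_of_le (by omega : a + 1 ≤ c) with hc | hc
  · -- c = a + 1: the left-column segment of coords is empty
    have h4 : (PySem.List.pyRange (a + 1) c 1).reverse.map (fun i => (i, (b : Int))) = [] := by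
      rw [PySem.List.pyRange_one_eq_nil (le_of_eq hc.symm)]
      rfl
    have hcoords : coordsOf a b c d = ((PySem.List.pyRange b (d + 1) 1).map (fun j => ((a : Int), j))
        ++ (PySem.List.pyRange (a + 1) (c + 1) 1).map (fun i => (i, (d : Int))))
        ++ ((PySem.List.pyRange b d 1).reverse.map (fun j => ((c : Int), j))) := by
      rw [coordsOf, h4, List.append_nil]
    rw [hcoords, F_append _ _ _ h12ne, F_append _ _ _ hC1ne,
      List.getLast_append_of_ne_nil _ hC2ne, getLast_C1 a b d hb, getLast_C2 a c d ha,
      FC1_eq a b d hb, FC2_eq a c d ha]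
    have hLeft : eLeft a b c = [(((a, b) : Int × Int), ((a + 1 : Int), (b : Int)))] := by
      rw [hhead, PySem.List.pyRange_one_eq_nil (le_of_eq hc.symm)]
      rfl
    refine ((List.Perm.append_left _ (FC3_perm b c d hb)).trans ?_)
    have hstep : ((((((a, b) : Int × Int), ((a + 1 : Int), (b : Int))) :: eTop a b d) ++ eRight a c d)
          ++ eBot b c d)
        = (((a, b), (a + 1, b)) : (Int × Int) × (Int × Int))
          :: ((eTop a b d ++ eRight a c d) ++ eBot b c d) := rfl
    rw [hstep]
    refine (List.perm_append_singleton _ _).symm.trans ?_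
    have hfin : ((eTop a b d ++ eRight a c d) ++ eBot b c d)
          ++ [(((a, b), (a + 1, b)) : (Int × Int) × (Int × Int))] = canon a b c d := by
      rw [canon, hLeft, List.append_assoc, List.append_assoc]
    rw [hfin]
  · -- a + 1 < c
    have hC4ne : ((PySem.List.pyRange (a + 1) c 1).reverse.map (fun i => (i, (b : Int)))) ≠ [] := by
      rw [C4_eq]
      exact pyRange_map_ne_nil 0 (c - a - 1) (by omega) _
    rw [coordsOf, F_append _ _ _ h123ne, F_append _ _ _ h12ne, F_append _ _ _ hC1ne,
      List.getLast_append_of_ne_nil _ hC2ne, getLast_C1 a b d hb, getLast_C2 a c d ha,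
      List.getLast_append_of_ne_nil _ hC3ne, getLast_C3 b c d hb,
      FC1_eq a b d hb, FC2_eq a c d ha]
    refine ((List.Perm.append_left _ (FC4_perm a b c hc)).trans ?_)
    refine ((List.Perm.append (List.Perm.append_left _ (FC3_perm b c d hb)) (List.Perm.refl _)).trans ?_)
    have hL : ((((((a, b) : Int × Int), ((a + 1 : Int), (b : Int))) :: eTop a b d) ++ eRight a c d)
          ++ eBot b c d)
          ++ (PySem.List.pyRange (a + 1) c 1).map (fun i => (((i, b) : Int × Int), (i + 1, b)))
        = (((a, b), (a + 1, b)) : (Int × Int) × (Int × Int))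
          :: (((eTop a b d ++ eRight a c d) ++ eBot b c d)
            ++ (PySem.List.pyRange (a + 1) c 1).map (fun i => (((i, b) : Int × Int), (i + 1, b)))) := rfl
    rw [hL, canon, hhead]
    have : eTop a b d ++ eRight a c d ++ eBot b c d ++
        ((((a, b) : Int × Int), ((a + 1 : Int), (b : Int)))
          :: (PySem.List.pyRange (a + 1) c 1).map (fun i => (((i, b) : Int × Int), (i + 1, b))))
        = (eTop a b d ++ eRight a c d ++ eBot b c d) ++
          ((((a, b) : Int × Int), ((a + 1 : Int), (b : Int)))
          :: (PySem.List.pyRange (a + 1) c 1).map (fun i => (((i, b) : Int × Int), (i + 1, b)))) := rfl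
    rw [this]
    exact List.perm_middle.symm

def edgesA (a b c d : Int) : List ((Int × Int) × (Int × Int)) :=
  eLeft a b c ++ eBot b c d
  ++ (PySem.List.pyRange c a (-1)).map (fun j => (((j, d) : Int × Int), (j - 1, d)))
  ++ (PySem.List.pyRange d (b + 1) (-1)).map (fun j => (((a, j) : Int × Int), (a, j - 1)))
  ++ [(((a, b + 1), (a, b)) : (Int × Int) × (Int × Int))]

lemma edgesA_perm (a b c d : Int) (ha : a < c) (hb : b < d) :
    (edgesA a b c d).Perm (canon a b c d) := by
  have hR : (PySem.List.pyRange c a (-1)).map (fun j => (((j, d) : Int × Int), (j - 1, d)))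
      = (eRight a c d).reverse := by
    rw [eRight, PySem.List.pyRange_neg_one_eq_reverse c a, List.map_reverse]
  have hT : (PySem.List.pyRange d (b + 1) (-1)).map (fun j => (((a, j) : Int × Int), (a, j - 1)))
      = ((PySem.List.pyRange (b + 2) (d + 1) 1).map
          (fun j => (((a, j) : Int × Int), (a, j - 1)))).reverse := by
    rw [PySem.List.pyRange_neg_one_eq_reverse d (b + 1), List.map_reverse,
      show b + 1 + 1 = b + 2 by ring]
  have hTop : eTop a b d = (((a, b + 1), (a, b)) : (Int × Int) × (Int × Int))
      :: (PySem.List.pyRange (b + 2) (d + 1) 1).map (fun j => (((a, j) : Int × Int), (a, j - 1))) := by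
    rw [eTop, PySem.List.pyRange_one_cons (show b + 1 < d + 1 by omega), List.map_cons,
      show b + 1 - 1 = b by ring, show b + 1 + 1 = b + 2 by ring]
  rw [edgesA, hR, hT, List.append_assoc (eLeft a b c ++ eBot b c d ++ (eRight a c d).reverse)]
  have hTp : ((List.map (fun j => (((a, j) : Int × Int), (a, j - 1)))
        (PySem.List.pyRange (b + 2) (d + 1) 1)).reverse
      ++ [(((a, b + 1), (a, b)) : (Int × Int) × (Int × Int))]).Perm (eTop a b d) := by
    rw [hTop]
    exact (List.perm_append_singleton _ _).trans ((List.reverse_perm _).cons _)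
  have h1 : (eLeft a b c ++ eBot b c d ++ (eRight a c d).reverse).Perm
      (eLeft a b c ++ eBot b c d ++ eRight a c d) :=
    List.Perm.append (List.Perm.refl _) (List.reverse_perm _)
  refine (List.Perm.append h1 hTp).trans ?_
  rw [show canon a b c d = eTop a b d ++ (eRight a c d ++ (eBot b c d ++ eLeft a b c))
    from by rw [canon, List.append_assoc, List.append_assoc]]
  refine List.perm_append_comm.trans (List.Perm.append_left _ ?_)
  exact List.perm_append_comm.trans (List.Perm.append_left _ List.perm_append_comm)

lemma nodup_map_pyRange {α : Type} (lo hi : Int) (f : Int → α) (hinj : Function.Injective f) :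
    ((PySem.List.pyRange lo hi 1).map f).Nodup :=
  (PySem.List.nodup_pyRange_one ..).map hinj

lemma coordsOf_nodup (a b c d : Int) (ha : a < c) (hb : b < d) : (coordsOf a b c d).Nodup := by
  rw [coordsOf, C3_eq, C4_eq]
  have n1 := nodup_map_pyRange b (d + 1) (fun j => ((a : Int), j))
    (fun p q h => by simpa using congrArg Prod.snd h)
  have n2 := nodup_map_pyRange (a + 1) (c + 1) (fun i => (i, (d : Int)))
    (fun p q h => by simpa using congrArg Prod.fst h)
  have n3 := nodup_map_pyRange 0 (d - b) (fun j => (((c : Int), d - 1 - j)))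
    (fun p q h => by have := congrArg Prod.snd h; simp at this; omega)
  have n4 := nodup_map_pyRange 0 (c - a - 1) (fun j => ((c - 1 - j, (b : Int))))
    (fun p q h => by have := congrArg Prod.fst h; simp at this; omega)
  have d12 : ((PySem.List.pyRange b (d + 1) 1).map (fun j => ((a : Int), j))).Disjoint
      ((PySem.List.pyRange (a + 1) (c + 1) 1).map (fun i => (i, (d : Int)))) := by
    intro p hp hq
    simp only [List.mem_map, PySem.List.mem_pyRange_one] at hp hq
    obtain ⟨j, hj, rfl⟩ := hp
    obtain ⟨i, hi, hiq⟩ := hq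
    have := congrArg Prod.fst hiq
    simp at this
    omega
  have d123 : (((PySem.List.pyRange b (d + 1) 1).map (fun j => ((a : Int), j)))
      ++ ((PySem.List.pyRange (a + 1) (c + 1) 1).map (fun i => (i, (d : Int))))).Disjoint
      ((PySem.List.pyRange 0 (d - b) 1).map (fun j => (((c : Int), d - 1 - j)))) := by
    intro p hp hq
    simp only [List.mem_append, List.mem_map, PySem.List.mem_pyRange_one] at hp hq
    obtain ⟨j, hj, rfl⟩ := hq
    rcases hp with ⟨i, hi, hip⟩ | ⟨i, hi, hip⟩
    · have h1 := congrArg Prod.fst hip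
      simp at h1
      omega
    · have h2 := congrArg Prod.snd hip
      simp at h2
      omega
  have d1234 : ((((PySem.List.pyRange b (d + 1) 1).map (fun j => ((a : Int), j)))
      ++ ((PySem.List.pyRange (a + 1) (c + 1) 1).map (fun i => (i, (d : Int)))))
      ++ ((PySem.List.pyRange 0 (d - b) 1).map (fun j => (((c : Int), d - 1 - j))))).Disjoint
      ((PySem.List.pyRange 0 (c - a - 1) 1).map (fun j => ((c - 1 - j, (b : Int))))) := by
    intro p hp hq
    simp only [List.mem_append, List.mem_map, PySem.List.mem_pyRange_one] at hp hq
    obtain ⟨j, hj, rfl⟩ := hq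
    rcases hp with (⟨i, hi, hip⟩ | ⟨i, hi, hip⟩) | ⟨i, hi, hip⟩
    · have h1 := congrArg Prod.fst hip
      simp at h1
      omega
    · have h2 := congrArg Prod.snd hip
      simp at h2
      omega
    · have h1 := congrArg Prod.fst hip
      simp at h1
      omega
  exact ((n1.append n2 d12).append n3 d123).append n4 d1234

lemma zip_rot_eq_F_map {α β : Type} (l : List α) (p : α) (f : α → β) :
    l.zip (f p :: l.dropLast.map f) = (F l p).map (fun e => (e.1, f e.2)) := by
  have hx : f p :: l.dropLast.map f = (p :: l.dropLast).map f := rfl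
  rw [hx, List.zip_map_right, F]
  rfl

lemma stepB_char (g : List (List Int)) (ans : List Int) (a b c d : Int) (rest : List Int)
    (ha : a < c) (hb : b < d) :
    solutionAltStep (g, ans) ((a + 1) :: (b + 1) :: (c + 1) :: (d + 1) :: rest)
      = (applyW g ((F (coordsOf a b c d) (a + 1, b)).map
            (fun e => (e.1, get2 g e.2.1 e.2.2))),
         ans ++ [(PySem.List.min? ((coordsOf a b c d).map (fun p => get2 g p.1 p.2))
            (fun x => x)).getD 0]) := by
  have h0 : PySem.List.pyGetD ((a + 1) :: (b + 1) :: (c + 1) :: (d + 1) :: rest) 0 0 = a + 1 := by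
    simp [pysem]
  have h1 : PySem.List.pyGetD ((a + 1) :: (b + 1) :: (c + 1) :: (d + 1) :: rest) 1 0 = b + 1 := by
    simp [pysem]
  have h2 : PySem.List.pyGetD ((a + 1) :: (b + 1) :: (c + 1) :: (d + 1) :: rest) 2 0 = c + 1 := by
    simp [pysem]
  have h3 : PySem.List.pyGetD ((a + 1) :: (b + 1) :: (c + 1) :: (d + 1) :: rest) 3 0 = d + 1 := by
    simp [pysem]
  simp only [solutionAltStep, h0, h1, h2, h3, add_sub_cancel_right]
  rw [← coordsOf]
  have hcne : coordsOf a b c d ≠ [] := coordsOf_ne_nil a b c d hb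
  have hrne : (coordsOf a b c d).map (fun p => get2 g p.1 p.2) ≠ [] := by
    intro hcon
    exact hcne (List.map_eq_nil_iff.mp hcon)
  rw [PySem.List.slice_from_neg_one, PySem.List.slice_to_neg_one,
    List.drop_length_sub_one hrne, List.getLast_map, coordsOf_getLast a b c d ha hb,
    ← List.map_dropLast, List.singleton_append,
    zip_rot_eq_F_map (coordsOf a b c d) ((a + 1, b) : Int × Int) (fun p => get2 g p.1 p.2)]
  rfl

lemma pairwise_pyRange_neg_one {P : Int → Int → Prop} (x y : Int)
    (h : ∀ u v : Int, v < u → P u v) : (PySem.List.pyRange x y (-1)).Pairwise P := by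
  rw [PySem.List.pyRange_neg_one_eq_reverse, List.pairwise_reverse]
  exact (PySem.List.pairwise_lt_pyRange_one (y + 1) (x + 1)).imp (fun {u v} huv => h v u huv)

lemma foldl_ite_min (L : List Int) (m : Int) (r : Int → Int) :
    L.foldl (fun m' j => if m' > r j then r j else m') m = List.foldl min m (L.map r) := by
  rw [List.foldl_map]
  exact List.foldl_ext _ _ _ (fun acc j _ => ite_min acc (r j))

lemma stepA_char (g : List (List Int)) (ans : List Int) (a b c d : Int) (rest : List Int)
    (ha : a < c) (hb : b < d) :
    solutionStep (g, ans) ((a + 1) :: (b + 1) :: (c + 1) :: (d + 1) :: rest)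
      = (applyW g ((((
            (PySem.List.pyRange a c 1).map (fun j => (((j, b) : Int × Int), get2 g (j + 1) b))
          ++ (PySem.List.pyRange b d 1).map (fun j => (((c, j) : Int × Int), get2 g c (j + 1))))
          ++ (PySem.List.pyRange c a (-1)).map (fun j => (((j, d) : Int × Int), get2 g (j - 1) d)))
          ++ (PySem.List.pyRange d (b + 1) (-1)).map (fun j => (((a, j) : Int × Int), get2 g a (j - 1))))
          ++ [(((a, b + 1) : Int × Int), get2 g a b)]),
        ans ++ [List.foldl min (get2 g a b) ((((
            (PySem.List.pyRange a c 1).map (fun j => get2 g (j + 1) b))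
          ++ (PySem.List.pyRange b d 1).map (fun j => get2 g c (j + 1)))
          ++ (PySem.List.pyRange c a (-1)).map (fun j => get2 g (j - 1) d))
          ++ (PySem.List.pyRange d (b + 1) (-1)).map (fun j => get2 g a (j - 1)))]) := by
  have h0 : PySem.List.pyGetD ((a + 1) :: (b + 1) :: (c + 1) :: (d + 1) :: rest) 0 0 = a + 1 := by
    simp [pysem]
  have h1 : PySem.List.pyGetD ((a + 1) :: (b + 1) :: (c + 1) :: (d + 1) :: rest) 1 0 = b + 1 := by
    simp [pysem]
  have h2 : PySem.List.pyGetD ((a + 1) :: (b + 1) :: (c + 1) :: (d + 1) :: rest) 2 0 = c + 1 := by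
    simp [pysem]
  have h3 : PySem.List.pyGetD ((a + 1) :: (b + 1) :: (c + 1) :: (d + 1) :: rest) 3 0 = d + 1 := by
    simp [pysem]
  simp only [solutionStep, h0, h1, h2, h3, add_sub_cancel_right]
  -- loop 1 (left column)
  have hp1 : (PySem.List.pyRange a c 1).Pairwise (fun x y => ¬(y + 1 = x ∧ b = b)) :=
    (PySem.List.pairwise_lt_pyRange_one a c).imp (fun {x y} hxy => by omega)
  rw [loopG (PySem.List.pyRange a c 1) (fun j => j) (fun _ => b) (fun j => j + 1) (fun _ => b)
    (fun m v => if m > v then v else m) g (get2 g a b) hp1]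
  set W1 : List ((Int × Int) × Int) :=
    (PySem.List.pyRange a c 1).map (fun j => (((j, b) : Int × Int), get2 g (j + 1) b)) with hW1
  set G1 : List (List Int) := applyW g W1 with hG1
  set M1 : Int := (PySem.List.pyRange a c 1).foldl
    (fun m' j => if m' > get2 g (j + 1) b then get2 g (j + 1) b else m') (get2 g a b) with hM1
  -- loop 2 (bottom row)
  have hp2 : (PySem.List.pyRange b d 1).Pairwise (fun x y => ¬(c = c ∧ y + 1 = x)) :=
    (PySem.List.pairwise_lt_pyRange_one b d).imp (fun {x y} hxy => by omega)
  rw [loopG (PySem.List.pyRange b d 1) (fun _ => c) (fun j => j) (fun _ => c) (fun j => j + 1)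
    (fun m v => if m > v then v else m) G1 M1 hp2]
  have hrd2 : ∀ j ∈ PySem.List.pyRange b d 1, get2 G1 c (j + 1) = get2 g c (j + 1) := by
    intro j hj
    rw [hG1]
    refine get2_applyW_ne g W1 c (j + 1) ?_
    intro e he
    rw [hW1] at he
    simp only [List.mem_map, PySem.List.mem_pyRange_one] at he
    obtain ⟨i, hi, rfl⟩ := he
    intro hcon
    have := congrArg Prod.fst hcon
    simp at this
    omega
  rw [show (PySem.List.pyRange b d 1).map (fun j => (((c, j) : Int × Int), get2 G1 c (j + 1)))
      = (PySem.List.pyRange b d 1).map (fun j => (((c, j) : Int × Int), get2 g c (j + 1)))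
    from List.map_congr_left (fun j hj => by rw [hrd2 j hj])]
  rw [show (PySem.List.pyRange b d 1).foldl
        (fun m' j => if m' > get2 G1 c (j + 1) then get2 G1 c (j + 1) else m') M1
      = (PySem.List.pyRange b d 1).foldl
        (fun m' j => if m' > get2 g c (j + 1) then get2 g c (j + 1) else m') M1
    from List.foldl_ext _ _ _ (fun acc j hj => by rw [hrd2 j hj])]
  rw [hG1, ← applyW_append]
  set W2 : List ((Int × Int) × Int) :=
    (PySem.List.pyRange b d 1).map (fun j => (((c, j) : Int × Int), get2 g c (j + 1))) with hW2
  set G2 : List (List Int) := applyW g (W1 ++ W2) with hG2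
  set M2 : Int := (PySem.List.pyRange b d 1).foldl
    (fun m' j => if m' > get2 g c (j + 1) then get2 g c (j + 1) else m') M1 with hM2
  -- loop 3 (right column, walking up)
  have hp3 : (PySem.List.pyRange c a (-1)).Pairwise (fun x y => ¬(y - 1 = x ∧ d = d)) :=
    pairwise_pyRange_neg_one c a (fun u v huv => by omega)
  rw [loopG (PySem.List.pyRange c a (-1)) (fun j => j) (fun _ => d) (fun j => j - 1) (fun _ => d)
    (fun m v => if m > v then v else m) G2 M2 hp3]
  have hrd3 : ∀ j ∈ PySem.List.pyRange c a (-1), get2 G2 (j - 1) d = get2 g (j - 1) d := by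
    intro j hj
    rw [PySem.List.mem_pyRange_neg_one] at hj
    rw [hG2]
    refine get2_applyW_ne g (W1 ++ W2) (j - 1) d ?_
    intro e he
    rw [List.mem_append] at he
    rcases he with he | he
    · rw [hW1] at he
      simp only [List.mem_map, PySem.List.mem_pyRange_one] at he
      obtain ⟨i, hi, rfl⟩ := he
      intro hcon
      have := congrArg Prod.snd hcon
      simp at this
      omega
    · rw [hW2] at he
      simp only [List.mem_map, PySem.List.mem_pyRange_one] at he
      obtain ⟨i, hi, rfl⟩ := he
      intro hcon
      have := congrArg Prod.fst hcon
      simp at this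
      omega
  rw [show (PySem.List.pyRange c a (-1)).map (fun j => (((j, d) : Int × Int), get2 G2 (j - 1) d))
      = (PySem.List.pyRange c a (-1)).map (fun j => (((j, d) : Int × Int), get2 g (j - 1) d))
    from List.map_congr_left (fun j hj => by rw [hrd3 j hj])]
  rw [show (PySem.List.pyRange c a (-1)).foldl
        (fun m' j => if m' > get2 G2 (j - 1) d then get2 G2 (j - 1) d else m') M2
      = (PySem.List.pyRange c a (-1)).foldl
        (fun m' j => if m' > get2 g (j - 1) d then get2 g (j - 1) d else m') M2
    from List.foldl_ext _ _ _ (fun acc j hj => by rw [hrd3 j hj])]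
  rw [hG2, ← applyW_append]
  set W3 : List ((Int × Int) × Int) :=
    (PySem.List.pyRange c a (-1)).map (fun j => (((j, d) : Int × Int), get2 g (j - 1) d)) with hW3
  set G3 : List (List Int) := applyW g (W1 ++ W2 ++ W3) with hG3
  set M3 : Int := (PySem.List.pyRange c a (-1)).foldl
    (fun m' j => if m' > get2 g (j - 1) d then get2 g (j - 1) d else m') M2 with hM3
  -- loop 4 (top row, walking left)
  have hp4 : (PySem.List.pyRange d (b + 1) (-1)).Pairwise (fun x y => ¬(a = a ∧ y - 1 = x)) :=
    pairwise_pyRange_neg_one d (b + 1) (fun u v huv => by omega)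
  rw [loopG (PySem.List.pyRange d (b + 1) (-1)) (fun _ => a) (fun j => j) (fun _ => a)
    (fun j => j - 1) (fun m v => if m > v then v else m) G3 M3 hp4]
  have hrd4 : ∀ j ∈ PySem.List.pyRange d (b + 1) (-1), get2 G3 a (j - 1) = get2 g a (j - 1) := by
    intro j hj
    rw [PySem.List.mem_pyRange_neg_one] at hj
    rw [hG3]
    refine get2_applyW_ne g (W1 ++ W2 ++ W3) a (j - 1) ?_
    intro e he
    rw [List.mem_append] at he
    rcases he with he | he
    · rw [List.mem_append] at he
      rcases he with he | he
      · rw [hW1] at he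
        simp only [List.mem_map, PySem.List.mem_pyRange_one] at he
        obtain ⟨i, hi, rfl⟩ := he
        intro hcon
        have := congrArg Prod.snd hcon
        simp at this
        omega
      · rw [hW2] at he
        simp only [List.mem_map, PySem.List.mem_pyRange_one] at he
        obtain ⟨i, hi, rfl⟩ := he
        intro hcon
        have := congrArg Prod.fst hcon
        simp at this
        omega
    · rw [hW3] at he
      simp only [List.mem_map, PySem.List.mem_pyRange_neg_one] at he
      obtain ⟨i, hi, rfl⟩ := he
      intro hcon
      have := congrArg Prod.fst hcon
      simp at this
      omega
  rw [show (PySem.List.pyRange d (b + 1) (-1)).map (fun j => (((a, j) : Int × Int), get2 G3 a (j - 1)))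
      = (PySem.List.pyRange d (b + 1) (-1)).map (fun j => (((a, j) : Int × Int), get2 g a (j - 1)))
    from List.map_congr_left (fun j hj => by rw [hrd4 j hj])]
  rw [show (PySem.List.pyRange d (b + 1) (-1)).foldl
        (fun m' j => if m' > get2 G3 a (j - 1) then get2 G3 a (j - 1) else m') M3
      = (PySem.List.pyRange d (b + 1) (-1)).foldl
        (fun m' j => if m' > get2 g a (j - 1) then get2 g a (j - 1) else m') M3
    from List.foldl_ext _ _ _ (fun acc j hj => by rw [hrd4 j hj])]
  rw [hG3, ← applyW_append]
  set W4 : List ((Int × Int) × Int) :=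
    (PySem.List.pyRange d (b + 1) (-1)).map (fun j => (((a, j) : Int × Int), get2 g a (j - 1))) with hW4
  -- final write and assemble
  refine Prod.ext ?_ ?_
  · show set2 (applyW g (W1 ++ W2 ++ W3 ++ W4)) a (b + 1) (get2 g a b) = _
    rw [show set2 (applyW g (W1 ++ W2 ++ W3 ++ W4)) a (b + 1) (get2 g a b)
        = applyW (applyW g (W1 ++ W2 ++ W3 ++ W4)) [(((a, b + 1) : Int × Int), get2 g a b)] from rfl,
      ← applyW_append]
  · show ans ++ [(PySem.List.pyRange d (b + 1) (-1)).foldl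
        (fun m' j => if m' > get2 g a (j - 1) then get2 g a (j - 1) else m') M3] = _
    rw [hM3, hM2, hM1,
      foldl_ite_min (PySem.List.pyRange a c 1) (get2 g a b) (fun j => get2 g (j + 1) b),
      foldl_ite_min (PySem.List.pyRange b d 1) _ (fun j => get2 g c (j + 1)),
      foldl_ite_min (PySem.List.pyRange c a (-1)) _ (fun j => get2 g (j - 1) d),
      foldl_ite_min (PySem.List.pyRange d (b + 1) (-1)) _ (fun j => get2 g a (j - 1)),
      ← List.foldl_append, ← List.foldl_append, ← List.foldl_append]
    simp only [← List.append_assoc]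

lemma edgesA_map_writes (g : List (List Int)) (a b c d : Int) :
    (edgesA a b c d).map (fun e => (e.1, get2 g e.2.1 e.2.2))
      = ((((PySem.List.pyRange a c 1).map (fun j => (((j, b) : Int × Int), get2 g (j + 1) b))
        ++ (PySem.List.pyRange b d 1).map (fun j => (((c, j) : Int × Int), get2 g c (j + 1))))
        ++ (PySem.List.pyRange c a (-1)).map (fun j => (((j, d) : Int × Int), get2 g (j - 1) d)))
        ++ (PySem.List.pyRange d (b + 1) (-1)).map (fun j => (((a, j) : Int × Int), get2 g a (j - 1))))
        ++ [(((a, b + 1) : Int × Int), get2 g a b)] := by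
  simp only [edgesA, eLeft, eBot, List.map_append, List.map_map, List.map_cons, List.map_nil]
  rfl

lemma edgesA_map_reads (g : List (List Int)) (a b c d : Int) :
    (edgesA a b c d).map (fun e => get2 g e.2.1 e.2.2)
      = ((((PySem.List.pyRange a c 1).map (fun j => get2 g (j + 1) b)
        ++ (PySem.List.pyRange b d 1).map (fun j => get2 g c (j + 1)))
        ++ (PySem.List.pyRange c a (-1)).map (fun j => get2 g (j - 1) d))
        ++ (PySem.List.pyRange d (b + 1) (-1)).map (fun j => get2 g a (j - 1)))
        ++ [get2 g a b] := by
  simp only [edgesA, eLeft, eBot, List.map_append, List.map_map, List.map_cons, List.map_nil]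
  rfl

lemma F_map_fst (l : List (Int × Int)) (p : Int × Int) (hl : l ≠ []) :
    (F l p).map Prod.fst = l := by
  rw [F]
  refine List.map_fst_zip ?_
  rw [List.length_cons, List.length_dropLast]
  have : 1 ≤ l.length := List.length_pos_iff.mpr hl
  omega

lemma F_map_snd (l : List (Int × Int)) (p : Int × Int) (hl : l ≠ []) :
    (F l p).map Prod.snd = p :: l.dropLast := by
  rw [F]
  refine List.map_snd_zip ?_
  rw [List.length_cons, List.length_dropLast]
  have : 1 ≤ l.length := List.length_pos_iff.mpr hl
  omega

lemma step_eq (g : List (List Int)) (ans : List Int) (a b c d : Int) (rest : List Int)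
    (ha : a < c) (hb : b < d) :
    solutionStep (g, ans) ((a + 1) :: (b + 1) :: (c + 1) :: (d + 1) :: rest)
      = solutionAltStep (g, ans) ((a + 1) :: (b + 1) :: (c + 1) :: (d + 1) :: rest) := by
  rw [stepA_char g ans a b c d rest ha hb, stepB_char g ans a b c d rest ha hb]
  have hcne : coordsOf a b c d ≠ [] := coordsOf_ne_nil a b c d hb
  have hperm : ((edgesA a b c d).map (fun e => (e.1, get2 g e.2.1 e.2.2))).Perm
      ((F (coordsOf a b c d) (a + 1, b)).map (fun e => (e.1, get2 g e.2.1 e.2.2))) :=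
    ((edgesA_perm a b c d ha hb).trans (edgesB_perm a b c d ha hb).symm).map _
  have hnodup : (((F (coordsOf a b c d) (a + 1, b)).map
      (fun e => (e.1, get2 g e.2.1 e.2.2))).map Prod.fst).Nodup := by
    rw [List.map_map, show (Prod.fst ∘ fun e : (Int × Int) × (Int × Int) =>
        (e.1, get2 g e.2.1 e.2.2)) = Prod.fst from rfl, F_map_fst _ _ hcne]
    exact coordsOf_nodup a b c d ha hb
  refine Prod.ext ?_ ?_
  · show applyW g _ = applyW g _
    rw [← edgesA_map_writes g a b c d]
    exact (applyW_perm g _ _ hperm.symm hnodup).symm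
  · show ans ++ [_] = ans ++ [_]
    have hringperm : ((coordsOf a b c d).map (fun p => get2 g p.1 p.2)).Perm
        ((get2 g a b) :: ((((PySem.List.pyRange a c 1).map (fun j => get2 g (j + 1) b)
          ++ (PySem.List.pyRange b d 1).map (fun j => get2 g c (j + 1)))
          ++ (PySem.List.pyRange c a (-1)).map (fun j => get2 g (j - 1) d))
          ++ (PySem.List.pyRange d (b + 1) (-1)).map (fun j => get2 g a (j - 1)))) := by
      have h1 : (coordsOf a b c d).Perm ((a + 1, b) :: (coordsOf a b c d).dropLast) := by
        conv_lhs => rw [← List.dropLast_concat_getLast hcne, coordsOf_getLast a b c d ha hb]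
        exact List.perm_append_singleton _ _
      have h2 : ((a + 1, b) :: (coordsOf a b c d).dropLast).map (fun p => get2 g p.1 p.2)
          = (F (coordsOf a b c d) (a + 1, b)).map (fun e => get2 g e.2.1 e.2.2) := by
        rw [show (fun e : (Int × Int) × (Int × Int) => get2 g e.2.1 e.2.2)
            = ((fun p : Int × Int => get2 g p.1 p.2) ∘ Prod.snd) from rfl,
          ← List.map_map, F_map_snd _ _ hcne]
      have h3 : ((F (coordsOf a b c d) (a + 1, b)).map (fun e => get2 g e.2.1 e.2.2)).Perm
          ((edgesA a b c d).map (fun e => get2 g e.2.1 e.2.2)) :=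
        ((edgesB_perm a b c d ha hb).trans (edgesA_perm a b c d ha hb).symm).map _
      refine ((h1.map _).trans ?_)
      rw [h2]
      refine h3.trans ?_
      rw [edgesA_map_reads g a b c d]
      exact List.perm_append_singleton _ _
    rw [minval_eq _ _ _ hringperm]

lemma step_eq' (g : List (List Int)) (ans : List Int) (q0 q1 q2 q3 : Int) (rest : List Int)
    (h02 : q0 < q2) (h13 : q1 < q3) :
    solutionStep (g, ans) (q0 :: q1 :: q2 :: q3 :: rest)
      = solutionAltStep (g, ans) (q0 :: q1 :: q2 :: q3 :: rest) := by
  have hx := step_eq g ans (q0 - 1) (q1 - 1) (q2 - 1) (q3 - 1) rest (by omega) (by omega)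
  rw [show q0 - 1 + 1 = q0 by ring, show q1 - 1 + 1 = q1 by ring,
    show q2 - 1 + 1 = q2 by ring, show q3 - 1 + 1 = q3 by ring] at hx
  exact hx

lemma foldl_steps (qs : List (List Int))
    (h : ∀ q ∈ qs, 4 ≤ q.length ∧ q.getD 0 0 < q.getD 2 0 ∧ q.getD 1 0 < q.getD 3 0) :
    ∀ st : List (List Int) × List Int,
      qs.foldl solutionStep st = qs.foldl solutionAltStep st := by
  induction qs with
  | nil => intro st; rfl
  | cons q qs ih =>
    intro st
    obtain ⟨g, ans⟩ := st
    have hq := h q List.mem_cons_self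
    rcases q with _ | ⟨q0, q⟩
    · simp at hq
    rcases q with _ | ⟨q1, q⟩
    · simp at hq
    rcases q with _ | ⟨q2, q⟩
    · simp at hq
    rcases q with _ | ⟨q3, rest⟩
    · simp at hq
    simp only [List.foldl_cons]
    rw [step_eq' g ans q0 q1 q2 q3 rest (by simpa using hq.2.1) (by simpa using hq.2.2)]
    exact ih (fun q' hq' => h q' (List.mem_cons_of_mem _ hq')) _

lemma arr0_eq (rows columns : Int) :
    (PySem.List.pyRange 0 rows 1).foldl
      (fun arr i => arr ++ [PySem.List.pyRange (columns * i + 1) (columns + columns * i + 1) 1]) []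
    = (PySem.List.pyRange 0 rows 1).map
      (fun i => (PySem.List.pyRange 1 (columns + 1) 1).map (fun j => columns * i + j)) := by
  rw [PySem.List.foldl_append_singleton_eq_map]
  refine List.map_congr_left (fun i _ => ?_)
  have h := map_pyRange_add (columns * i) 1 (columns + 1) (fun j : Int => j)
  rw [List.map_id'] at h
  rw [show columns * i + 1 = 1 + columns * i by ring,
    show columns + columns * i + 1 = columns + 1 + columns * i by ring, h]
  exact List.map_congr_left (fun j _ => by ring)

-- ===== VERDICT (by name: the statement is the Claim_ definition above) =====
theorem solution_spec : Claim_equal_solution := by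
  intro rows columns queries hdom hpre
  show solution rows columns queries = solution_alt rows columns queries
  simp only [solution, solution_alt]
  rw [arr0_eq rows columns]
  rw [foldl_steps queries (fun q hq => ⟨(hpre q hq).1, (hpre q hq).2.2.1,
    (hpre q hq).2.2.2.2.2.1⟩)]
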